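-- pv_equiv track=rewrite | github.com/Syhmeon/raiku-revenue-model | scripts/build_daily_temporal.py | classify_program
-- ===== SOURCE A (Python) =====
-- BIZ_CATEGORIES = {
--     "prop_amm":     {"cat": "dex",         "subs": ["prop_amm"]},
--     "orderbook":    {"cat": "dex",         "subs": ["orderbook"]},
--     "amm_pools":    {"cat": "dex",         "subs": ["amm", "clmm", "dlmm", "bonding_curve"]},
--     "perps":        {"cat": "perps",       "subs": ["perpetuals"]},
--     "lending":      {"cat": "lending",     "subs": ["pool", "flash_loan", "yield"]},
--     "aggregator":   {"cat": "dex",         "subs": ["aggregator"]},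
--     "oracle":       {"cat": "oracle",      "subs": ["price_feed"]},
--     "bridge":       {"cat": "bridge",      "subs": ["cross_chain"]},
--     "trading_bots": {"cat": "trading_bot", "subs": ["keeper"]},
--     "infra":        {"cat": ["defi", "payments", "staking"], "subs": None},  # matches any sub
-- }
--
-- def classify_program(cat: str, sub: str) -> str:
--     """Map (raiku_category, subcategory) to business category ID."""
--     for biz_id, rule in BIZ_CATEGORIES.items():
--         if biz_id == "infra":
--             # Special: matches multiple categories, any subcategory
--             if cat in rule["cat"]:
--                 return biz_id
--         else:
--             if cat == rule["cat"] and sub in rule["subs"]: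
--                 return biz_id
--     return None  # not mapped
-- ===== SOURCE B (Python) =====
-- # Precomputed inverted index: (category, subcategory) -> business id, built once;
-- # infra is a category-only test against a frozen set.
-- INFRA_CATS = frozenset({"defi", "payments", "staking"})
--
-- INDEX = {
--     ("dex", "prop_amm"): "prop_amm",
--     ("dex", "orderbook"): "orderbook",
--     ("dex", "amm"): "amm_pools",
--     ("dex", "clmm"): "amm_pools",
--     ("dex", "dlmm"): "amm_pools",
--     ("dex", "bonding_curve"): "amm_pools",
--     ("perps", "perpetuals"): "perps",
--     ("lending", "pool"): "lending",
--     ("lending", "flash_loan"): "lending",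
--     ("lending", "yield"): "lending",
--     ("dex", "aggregator"): "aggregator",
--     ("oracle", "price_feed"): "oracle",
--     ("bridge", "cross_chain"): "bridge",
--     ("trading_bot", "keeper"): "trading_bots",
-- }
--
-- def classify_program(cat: str, sub: str) -> str:
--     """Map (raiku_category, subcategory) to business category ID."""
--     if cat in INFRA_CATS:
--         return "infra"
--     return INDEX.get((cat, sub))
-- ===== Notes on version B (the rewrite author's own statement) =====
-- stated objective: idiomatic
-- what changed: Replaced the per-call linear scan over the rule table (with per-entry infra branching) by a module-level inverted index dict keyed by (category, subcategory) plus a frozen infra-category set, so each call is one set test and one keyed lookup.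
import Mathlib
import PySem

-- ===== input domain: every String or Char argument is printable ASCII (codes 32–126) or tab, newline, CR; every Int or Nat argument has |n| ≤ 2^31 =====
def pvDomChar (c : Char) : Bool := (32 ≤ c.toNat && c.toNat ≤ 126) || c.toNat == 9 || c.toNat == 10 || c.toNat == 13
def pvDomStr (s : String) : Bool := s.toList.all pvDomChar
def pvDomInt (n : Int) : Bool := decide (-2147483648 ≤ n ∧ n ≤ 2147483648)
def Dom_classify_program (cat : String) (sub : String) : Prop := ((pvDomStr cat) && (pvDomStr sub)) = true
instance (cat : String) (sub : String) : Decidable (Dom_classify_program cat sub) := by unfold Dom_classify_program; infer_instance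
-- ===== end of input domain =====

-- B replaces A's per-call linear scan of the rule table by a precomputed
-- (category, subcategory) → id index plus an infra-category set (idiomatic).

-- ===== PORT A =====
-- Python's rule dict holds heterogeneous "cat" fields (a string, or a list of
-- strings for "infra"); encoded with a Sum, exact on these literals.
def BIZ_CATEGORIES : List (String × (String ⊕ List String) × Option (List String)) :=
  [ ("prop_amm",     (Sum.inl "dex",         some ["prop_amm"])),
    ("orderbook",    (Sum.inl "dex",         some ["orderbook"])),
    ("amm_pools",    (Sum.inl "dex",         some ["amm", "clmm", "dlmm", "bonding_curve"])),
    ("perps",        (Sum.inl "perps",       some ["perpetuals"])),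
    ("lending",      (Sum.inl "lending",     some ["pool", "flash_loan", "yield"])),
    ("aggregator",   (Sum.inl "dex",         some ["aggregator"])),
    ("oracle",       (Sum.inl "oracle",      some ["price_feed"])),
    ("bridge",       (Sum.inl "bridge",      some ["cross_chain"])),
    ("trading_bots", (Sum.inl "trading_bot", some ["keeper"])),
    ("infra",        (Sum.inr ["defi", "payments", "staking"], none)) ]

-- the 'for biz_id, rule in BIZ_CATEGORIES.items()' loop with early return
def classifyLoop (cat : String) (sub : String) :
    List (String × (String ⊕ List String) × Option (List String)) → Option String
  | [] => none
  | (bizId, rcat, rsubs) :: rest =>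
    if bizId == "infra" then
      -- 'if cat in rule["cat"]' (list membership on the infra entry)
      if (match rcat with | Sum.inl c => cat == c | Sum.inr cs => cs.contains cat) then some bizId
      else classifyLoop cat sub rest
    else
      -- 'if cat == rule["cat"] and sub in rule["subs"]'
      if ((match rcat with | Sum.inl c => cat == c | Sum.inr _ => false)
          && (match rsubs with | some ss => ss.contains sub | none => false)) then some bizId
      else classifyLoop cat sub rest

def classify_program (cat : String) (sub : String) : Option String :=
  classifyLoop cat sub BIZ_CATEGORIES

-- ===== PORT B =====
def INFRA_CATS : PySem.Set String := PySem.Set.ofList ["defi", "payments", "staking"]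

def INDEX : PySem.Dict (String × String) String := PySem.Dict.ofList
  [ (("dex", "prop_amm"), "prop_amm"),
    (("dex", "orderbook"), "orderbook"),
    (("dex", "amm"), "amm_pools"),
    (("dex", "clmm"), "amm_pools"),
    (("dex", "dlmm"), "amm_pools"),
    (("dex", "bonding_curve"), "amm_pools"),
    (("perps", "perpetuals"), "perps"),
    (("lending", "pool"), "lending"),
    (("lending", "flash_loan"), "lending"),
    (("lending", "yield"), "lending"),
    (("dex", "aggregator"), "aggregator"),
    (("oracle", "price_feed"), "oracle"),
    (("bridge", "cross_chain"), "bridge"),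
    (("trading_bot", "keeper"), "trading_bots") ]

def classify_program_alt (cat : String) (sub : String) : Option String :=
  if INFRA_CATS.contains cat then some "infra"
  else INDEX.get? (cat, sub)

-- ===== PRECONDITION & SPEC =====
def Spec_classify_program (cat : String) (sub : String) (out : Option String) : Prop := out = classify_program_alt cat sub
instance (cat : String) (sub : String) (out : Option String) : Decidable (Spec_classify_program cat sub out) := by unfold Spec_classify_program; infer_instance

-- ===== CLAIM (what is proved, stated in full; the proofs are below) =====
def Claim_equal_classify_program : Prop := ∀ (cat : String) (sub : String), Dom_classify_program cat sub → Spec_classify_program cat sub (classify_program cat sub)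

-- ===== LEMMAS AND PROOFS =====
theorem INFRA_CATS_eq : INFRA_CATS = ["defi", "payments", "staking"] := by decide

set_option maxHeartbeats 1000000 in
theorem INDEX_eq : INDEX = PySem.Dict.mk
    [ (("dex", "prop_amm"), "prop_amm"),
      (("dex", "orderbook"), "orderbook"),
      (("dex", "amm"), "amm_pools"),
      (("dex", "clmm"), "amm_pools"),
      (("dex", "dlmm"), "amm_pools"),
      (("dex", "bonding_curve"), "amm_pools"),
      (("perps", "perpetuals"), "perps"),
      (("lending", "pool"), "lending"),
      (("lending", "flash_loan"), "lending"),
      (("lending", "yield"), "lending"),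
      (("dex", "aggregator"), "aggregator"),
      (("oracle", "price_feed"), "oracle"),
      (("bridge", "cross_chain"), "bridge"),
      (("trading_bot", "keeper"), "trading_bots") ] := by decide

set_option maxHeartbeats 2000000 in
theorem classify_eq (cat sub : String) :
    classify_program cat sub = classify_program_alt cat sub := by
  simp only [classify_program, classify_program_alt, BIZ_CATEGORIES, classifyLoop,
    INFRA_CATS_eq, INDEX_eq, PySem.Set.contains, PySem.Dict.get?,
    List.contains_cons, List.contains_nil, beq_iff_eq, Bool.and_eq_true, Bool.or_eq_true, Bool.false_eq_true,
    or_false, String.reduceEq, if_false, Bool.false_and]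
  split_ifs <;> simp_all <;> aesop

-- ===== VERDICT (by name: the statement is the Claim_ definition above) =====
theorem classify_program_spec : Claim_equal_classify_program := by
  intro cat sub _
  unfold Spec_classify_program
  exact classify_eq cat sub
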